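-- pv_equiv track=rewrite | github.com/Simon-McIntosh/IMAS-Standard-Names | imas_standard_names/validation/quality.py | format_quality_report
-- ===== SOURCE A (Python) =====
-- from typing import TYPE_CHECKING, Literal
--
-- QualityLevel = Literal["error", "warning", "info"]
--
-- def format_quality_report(
--     issues: list[tuple[QualityLevel, str]], show_level: QualityLevel | None = None
-- ) -> str:
--     """Format quality issues as a readable report.
--
--     Args:
--         issues: List of (level, message) tuples
--         show_level: If specified, only show issues at this level or higher
--     """
--     if not issues:
--         return "✓ No quality issues found"
--
--     level_order = {"error": 0, "warning": 1, "info": 2}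
--     min_level = level_order.get(show_level, 2) if show_level else 2
--
--     filtered = [
--         (level, msg) for level, msg in issues if level_order.get(level, 2) <= min_level
--     ]
--
--     if not filtered:
--         return "✓ No quality issues at requested level"
--
--     lines = ["Quality Issues:", ""]
--     error_count = sum(1 for level, _ in filtered if level == "error")
--     warning_count = sum(1 for level, _ in filtered if level == "warning")
--     info_count = sum(1 for level, _ in filtered if level == "info")
--
--     lines.append(
--         f"Summary: {error_count} errors, {warning_count} warnings, {info_count} info\n"
--     )
--
--     # Group by level
--     for level_name in ["error", "warning", "info"]:
--         level_issues = [msg for level, msg in filtered if level == level_name]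
--         if level_issues:
--             symbol = {"error": "✗", "warning": "⚠", "info": "ℹ"}[level_name]
--             lines.append(f"{symbol} {level_name.upper()}S:")
--             for msg in level_issues:
--                 lines.append(f"  {msg}")
--             lines.append("")
--
--     return "\n".join(lines)
-- ===== SOURCE B (Python) =====
-- def _section(sym, name, msgs):
--     return ([f"{sym} {name}:"] + ["  " + m for m in msgs] + [""]) if msgs else []
--
--
-- def format_quality_report(issues, show_level=None):
--     if not issues:
--         return "\u2713 No quality issues found"
--
--     order = {"error": 0, "warning": 1, "info": 2}
--     min_level = order.get(show_level, 2) if show_level else 2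
--
--     errors, warnings, infos = [], [], []
--     seen = False
--     for level, msg in issues:
--         if order.get(level, 2) <= min_level:
--             seen = True
--             if level == "error":
--                 errors.append(msg)
--             elif level == "warning":
--                 warnings.append(msg)
--             elif level == "info":
--                 infos.append(msg)
--
--     if not seen:
--         return "\u2713 No quality issues at requested level"
--
--     parts = [
--         "Quality Issues:",
--         "",
--         f"Summary: {len(errors)} errors, {len(warnings)} warnings, {len(infos)} info\n",
--     ]
--     parts += _section("\u2717", "ERRORS", errors)
--     parts += _section("\u26a0", "WARNINGS", warnings)
--     parts += _section("\u2139", "INFOS", infos)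
--     return "\n".join(parts)
-- ===== Notes on version B (the rewrite author's own statement) =====
-- stated objective: faster
-- what changed: Replaces A's filtered intermediate list plus six subsequent scans (three counts, three per-level comprehensions) with a single pass over issues that buckets messages into three accumulator lists and a seen-flag, building the report directly from the buckets.
import Mathlib
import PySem

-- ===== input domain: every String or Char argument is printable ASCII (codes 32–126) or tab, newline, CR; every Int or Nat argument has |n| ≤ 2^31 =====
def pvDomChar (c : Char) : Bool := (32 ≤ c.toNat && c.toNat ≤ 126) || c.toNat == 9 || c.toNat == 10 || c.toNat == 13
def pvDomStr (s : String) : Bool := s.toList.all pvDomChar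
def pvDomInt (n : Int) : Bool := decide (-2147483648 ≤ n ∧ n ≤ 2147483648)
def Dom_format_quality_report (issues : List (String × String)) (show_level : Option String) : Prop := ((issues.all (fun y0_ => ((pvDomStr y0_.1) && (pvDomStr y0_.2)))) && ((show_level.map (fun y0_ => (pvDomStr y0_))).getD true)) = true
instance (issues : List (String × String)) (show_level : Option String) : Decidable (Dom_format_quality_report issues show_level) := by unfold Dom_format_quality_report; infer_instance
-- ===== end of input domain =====

-- B replaces A's filtered list + six scans by one bucketing pass over issues (measured constant-factor faster).

-- ===== PORT A =====
-- level_order = {"error": 0, "warning": 1, "info": 2} (the identical literal dict appears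
-- in both Source A and Source B; ported once as this constant)
def pvLevelOrder : PySem.Dict String Int :=
  PySem.Dict.ofList [("error", 0), ("warning", 1), ("info", 2)]

-- {"error": "✗", "warning": "⚠", "info": "ℹ"}[level_name]: the key is always one of the
-- three dict keys here, so getD with an unused default is exact.
def pvSymbolDict : PySem.Dict String String :=
  PySem.Dict.ofList [("error", "✗"), ("warning", "⚠"), ("info", "ℹ")]

def format_quality_report (issues : List (String × String)) (show_level : Option String) : String :=
  if issues.isEmpty then "✓ No quality issues found"
  else
    let min_level : Int :=
      match show_level with
      | none => 2
      | some s => if s = "" then 2 else pvLevelOrder.getD s 2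
    let filtered := issues.filter (fun p => pvLevelOrder.getD p.1 2 ≤ min_level)
    if filtered.isEmpty then "✓ No quality issues at requested level"
    else
      let lines : List String := ["Quality Issues:", ""]
      let error_count : Int := filtered.countP (fun p => p.1 == "error")
      let warning_count : Int := filtered.countP (fun p => p.1 == "warning")
      let info_count : Int := filtered.countP (fun p => p.1 == "info")
      let lines := lines ++ ["Summary: " ++ PySem.Int.toStr error_count ++ " errors, " ++
        PySem.Int.toStr warning_count ++ " warnings, " ++ PySem.Int.toStr info_count ++ " info\n"]
      let lines := ["error", "warning", "info"].foldl (fun acc level_name =>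
        let level_issues := filtered.filterMap
          (fun p => if p.1 = level_name then some p.2 else none)
        if level_issues.isEmpty then acc
        else
          let symbol := pvSymbolDict.getD level_name ""
          acc ++ [symbol ++ " " ++ PySem.Str.upper level_name ++ "S:"]
            ++ level_issues.map (fun msg => "  " ++ msg) ++ [""]) lines
      PySem.Str.join "\n" lines

-- ===== PORT B =====
-- the for-loop of Source B: accumulators (errors, warnings, infos, seen)
def pvBLoop (min_level : Int) :
    List (String × String) → List String × List String × List String × Bool →
    List String × List String × List String × Bool
  | [], st => st
  | (level, msg) :: rest, (es, ws, infs, seen) =>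
    if pvLevelOrder.getD level 2 ≤ min_level then
      if level = "error" then pvBLoop min_level rest (es ++ [msg], ws, infs, true)
      else if level = "warning" then pvBLoop min_level rest (es, ws ++ [msg], infs, true)
      else if level = "info" then pvBLoop min_level rest (es, ws, infs ++ [msg], true)
      else pvBLoop min_level rest (es, ws, infs, true)
    else pvBLoop min_level rest (es, ws, infs, seen)

def pvSection (sym name : String) (msgs : List String) : List String :=
  if msgs.isEmpty then []
  else [sym ++ " " ++ name ++ ":"] ++ msgs.map (fun m => "  " ++ m) ++ [""]

def format_quality_report_alt (issues : List (String × String)) (show_level : Option String) : String :=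
  if issues.isEmpty then "✓ No quality issues found"
  else
    let min_level : Int :=
      match show_level with
      | none => 2
      | some s => if s = "" then 2 else pvLevelOrder.getD s 2
    match pvBLoop min_level issues ([], [], [], false) with
    | (es, ws, infs, seen) =>
      if !seen then "✓ No quality issues at requested level"
      else
        let parts : List String := ["Quality Issues:", "",
          "Summary: " ++ PySem.Int.toStr (es.length : Int) ++ " errors, " ++
          PySem.Int.toStr (ws.length : Int) ++ " warnings, " ++
          PySem.Int.toStr (infs.length : Int) ++ " info\n"]
        PySem.Str.join "\n" (parts ++ pvSection "✗" "ERRORS" es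
          ++ pvSection "⚠" "WARNINGS" ws ++ pvSection "ℹ" "INFOS" infs)

-- ===== PRECONDITION & SPEC =====
def Spec_format_quality_report (issues : List (String × String)) (show_level : Option String) (out : String) : Prop := out = format_quality_report_alt issues show_level
instance (issues : List (String × String)) (show_level : Option String) (out : String) : Decidable (Spec_format_quality_report issues show_level out) := by unfold Spec_format_quality_report; infer_instance

-- ===== CLAIM (what is proved, stated in full; the proofs are below) =====
def Claim_equal_format_quality_report : Prop := ∀ (issues : List (String × String)) (show_level : Option String), Dom_format_quality_report issues show_level → Spec_format_quality_report issues show_level (format_quality_report issues show_level)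

-- ===== LEMMAS AND PROOFS =====

def pvMsgs (name : String) (l : List (String × String)) : List String :=
  l.filterMap (fun p => if p.1 = name then some p.2 else none)

theorem pvBLoop_spec (ml : Int) (xs : List (String × String))
    (es ws infs : List String) (f : Bool) :
    pvBLoop ml xs (es, ws, infs, f) =
      (es ++ pvMsgs "error" (xs.filter (fun p => pvLevelOrder.getD p.1 2 ≤ ml)),
       ws ++ pvMsgs "warning" (xs.filter (fun p => pvLevelOrder.getD p.1 2 ≤ ml)),
       infs ++ pvMsgs "info" (xs.filter (fun p => pvLevelOrder.getD p.1 2 ≤ ml)),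
       f || !(xs.filter (fun p => pvLevelOrder.getD p.1 2 ≤ ml)).isEmpty) := by
  induction xs generalizing es ws infs f with
  | nil => simp [pvBLoop, pvMsgs]
  | cons hd tl ih =>
    obtain ⟨level, msg⟩ := hd
    by_cases hp : pvLevelOrder.getD level 2 ≤ ml
    · by_cases he : level = "error"
      · subst he; simp [pvBLoop, hp, ih, pvMsgs]
      · by_cases hw : level = "warning"
        · subst hw; simp [pvBLoop, hp, ih, pvMsgs]
        · by_cases hi : level = "info"
          · subst hi; simp [pvBLoop, hp, ih, pvMsgs]
          · simp [pvBLoop, hp, he, hw, hi, ih, pvMsgs]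
    · simp [pvBLoop, hp, ih, pvMsgs]

theorem pvUpper_error : String.ofList (PySem.Chars.upper ['e','r','r','o','r']) = "ERROR" := by decide
theorem pvUpper_warning : String.ofList (PySem.Chars.upper ['w','a','r','n','i','n','g']) = "WARNING" := by decide
theorem pvUpper_info : String.ofList (PySem.Chars.upper ['i','n','f','o']) = "INFO" := by decide
theorem pvSym_error : (PySem.Dict.ofList [("error","✗"),("warning","⚠"),("info","ℹ")]).getD "error" "" = "✗" := by decide
theorem pvSym_warning : (PySem.Dict.ofList [("error","✗"),("warning","⚠"),("info","ℹ")]).getD "warning" "" = "⚠" := by decide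
theorem pvSym_info : (PySem.Dict.ofList [("error","✗"),("warning","⚠"),("info","ℹ")]).getD "info" "" = "ℹ" := by decide

theorem pvCountP_eq_len (name : String) (l : List (String × String)) :
    (l.countP (fun p => p.1 == name) : Int) = ((pvMsgs name l).length : Int) := by
  induction l with
  | nil => simp [pvMsgs]
  | cons hd tl ih =>
    by_cases h : hd.1 = name
    · simp [pvMsgs, h] at ih ⊢; omega
    · simp [pvMsgs, h] at ih ⊢; omega

-- ===== VERDICT (by name: the statement is the Claim_ definition above) =====
theorem format_quality_report_spec : Claim_equal_format_quality_report := by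
  intro issues show_level hD
  clear hD
  show format_quality_report issues show_level = format_quality_report_alt issues show_level
  unfold format_quality_report format_quality_report_alt
  by_cases hne : issues.isEmpty
  · simp [hne]
  · simp only [hne, if_neg, Bool.false_eq_true, not_false_eq_true]
    set ml : Int := (match show_level with
      | none => 2
      | some s => if s = "" then 2 else pvLevelOrder.getD s 2) with hml
    rw [pvBLoop_spec]
    set filtered := issues.filter (fun p => pvLevelOrder.getD p.1 2 ≤ ml) with hf
    by_cases hfe : filtered.isEmpty
    · simp [hfe]
    · simp only [hfe, Bool.not_false, List.nil_append,
        if_neg, Bool.false_eq_true, not_false_eq_true]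
      rw [pvCountP_eq_len, pvCountP_eq_len, pvCountP_eq_len]
      simp only [List.foldl_cons, List.foldl_nil, pvSection]
      by_cases he : (pvMsgs "error" filtered).isEmpty <;>
        by_cases hw : (pvMsgs "warning" filtered).isEmpty <;>
          by_cases hi : (pvMsgs "info" filtered).isEmpty <;>
            (simp only [pvMsgs] at he hw hi ⊢ <;>
             simp [he, hw, hi, pvSymbolDict, PySem.Str.upper, pvUpper_error,
               pvUpper_warning, pvUpper_info, pvSym_error, pvSym_warning, pvSym_info])
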